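-- pv_equiv track=rewrite | github.com/JoeSzymkowiczFiveM/gta-native-audio | _audiogen/hash.py | joaat_hash3f
-- ===== SOURCE A (Python) =====
-- def joaat_hash3f(inp):
--     encoded = str.encode(inp)
--     hsh = 0
--     for byte in encoded:
--         hsh += byte
--         hsh &= 0xFFFFFFFF
--         hsh += hsh << 10
--         hsh &= 0xFFFFFFFF
--         hsh ^= hsh >> 6
--
--     hsh += hsh << 3
--     hsh &= 0xFFFFFFFF
--     hsh ^= hsh >> 11
--     hsh &= 0xFFFFFFFF
--     hsh += hsh << 15
--     hsh &= 0xFFFFFFFF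
--     hsh &= 0x3FFFFFFF
--     return hsh
-- ===== SOURCE B (Python) =====
-- # Chunked big-integer traversal: packs the message into 64-byte little-endian
-- # integer registers and peels bytes off arithmetically, folding each into the
-- # hash with a single multiplicative congruence per step instead of A's
-- # statement-by-statement mask-and-shift mutation of one running variable.
--
-- def joaat_hash3f(inp):
--     data = str.encode(inp)
--     h = 0
--     i = 0
--     while i < len(data):
--         chunk = data[i:i + 64]
--         i += 64
--         n = int.from_bytes(chunk, 'little')
--         for _ in range(len(chunk)):
--             h = (h + (n & 255)) * 1025 % 4294967296
--             h ^= h >> 6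
--             n >>= 8
--     h = h * 9 % 4294967296
--     h ^= h >> 11
--     return h * 32769 % 4294967296 % 1073741824
-- ===== Notes on version B (the rewrite author's own statement) =====
-- stated objective: alternative
-- what changed: B changes the data traversal: instead of A's per-byte loop mutating one variable with mask-and-shift statements, it packs the message into 64-byte little-endian integer registers via int.from_bytes and peels bytes off arithmetically (n & 255, n >>= 8), folding each with a single multiplicative congruence ((h+b)*1025 % 2**32, and *9/*32769 in the finalizer) per step.
import Mathlib
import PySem

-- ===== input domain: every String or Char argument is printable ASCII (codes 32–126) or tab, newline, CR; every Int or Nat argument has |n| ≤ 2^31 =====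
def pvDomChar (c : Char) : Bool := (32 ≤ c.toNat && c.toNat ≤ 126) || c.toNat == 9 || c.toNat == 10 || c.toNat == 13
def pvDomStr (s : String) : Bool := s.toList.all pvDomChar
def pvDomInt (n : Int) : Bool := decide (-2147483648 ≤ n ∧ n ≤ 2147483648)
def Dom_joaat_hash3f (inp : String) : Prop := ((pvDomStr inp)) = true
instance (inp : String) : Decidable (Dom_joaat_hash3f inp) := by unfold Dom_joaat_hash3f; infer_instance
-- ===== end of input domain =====

-- B traverses the message as 64-byte little-endian integer registers, peeling
-- bytes off arithmetically and folding each with one multiplicative congruence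
-- per step, instead of A's per-byte mask-and-shift loop; no speed claim.

-- ===== PORT A =====
-- str.encode is UTF-8; on the ASCII domain each char encodes to the single
-- byte Char.toNat, so the byte list is exactly this map (the hash state is a
-- nonnegative Python int throughout, modelled as Nat).
def joaat_hash3f (inp : String) : Int :=
  let encoded : List Nat := inp.toList.map Char.toNat
  let hsh : Nat := encoded.foldl (fun hsh byte =>
    let h1 := (hsh + byte) &&& 0xFFFFFFFF
    let h2 := (h1 + (h1 <<< 10)) &&& 0xFFFFFFFF
    h2 ^^^ (h2 >>> 6)) 0
  let h3 := (hsh + (hsh <<< 3)) &&& 0xFFFFFFFF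
  let h4 := (h3 ^^^ (h3 >>> 11)) &&& 0xFFFFFFFF
  let h5 := (h4 + (h4 <<< 15)) &&& 0xFFFFFFFF
  ((h5 &&& 0x3FFFFFFF : Nat) : Int)

-- ===== PORT B =====
-- int.from_bytes(chunk, 'little'): little-endian value of the byte list
def pvFromLE (chunk : List Nat) : Nat := chunk.foldr (fun b acc => acc * 256 + b) 0

-- the inner 'for _ in range(len(chunk))' loop peeling bytes off the register n
def pvPeel (h n : Nat) : Nat → Nat
  | 0 => h
  | k + 1 =>
    let h1 := (h + (n &&& 255)) * 1025 % 4294967296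
    let h2 := h1 ^^^ (h1 >>> 6)
    pvPeel h2 (n >>> 8) k

-- the outer 'while i < len(data)' loop; data[i:i+64] with 0 ≤ i is exactly
-- (data.drop i).take 64 (PySem.List.slice_natCast_add)
def pvChunks (data : List Nat) (h i : Nat) : Nat :=
  if i < data.length then
    let chunk := (data.drop i).take 64
    pvChunks data (pvPeel h (pvFromLE chunk) chunk.length) (i + 64)
  else h
termination_by data.length - i
decreasing_by omega

def joaat_hash3f_alt (inp : String) : Int :=
  let data : List Nat := inp.toList.map Char.toNat
  let h := pvChunks data 0 0
  let h1 := h * 9 % 4294967296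
  let h2 := h1 ^^^ (h1 >>> 11)
  ((h2 * 32769 % 4294967296 % 1073741824 : Nat) : Int)

-- ===== PRECONDITION & SPEC =====
def Spec_joaat_hash3f (inp : String) (out : Int) : Prop := out = joaat_hash3f_alt inp
instance (inp : String) (out : Int) : Decidable (Spec_joaat_hash3f inp out) := by unfold Spec_joaat_hash3f; infer_instance

-- ===== CLAIM (what is proved, stated in full; the proofs are below) =====
def Claim_equal_joaat_hash3f : Prop := ∀ (inp : String), Dom_joaat_hash3f inp → Spec_joaat_hash3f inp (joaat_hash3f inp)

-- ===== LEMMAS AND PROOFS =====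

-- B's per-byte step, as a function (the common form both sides reduce to)
def pvMixB (h b : Nat) : Nat :=
  let h1 := (h + b) * 1025 % 4294967296
  h1 ^^^ (h1 >>> 6)

-- masking with 2^k - 1 is reduction mod 2^k
theorem pv_and_mask32 (n : Nat) : n &&& 0xFFFFFFFF = n % 4294967296 := by
  have := Nat.and_two_pow_sub_one_eq_mod n 32
  simpa using this

theorem pv_and_mask30 (n : Nat) : n &&& 0x3FFFFFFF = n % 1073741824 := by
  have := Nat.and_two_pow_sub_one_eq_mod n 30
  simpa using this

theorem pv_and_mask8 (n : Nat) : n &&& 255 = n % 256 := by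
  have := Nat.and_two_pow_sub_one_eq_mod n 8
  simpa using this

-- A's loop body equals B's per-byte step
theorem pv_stepA_eq (h b : Nat) :
    (let h1 := (h + b) &&& 0xFFFFFFFF
     let h2 := (h1 + (h1 <<< 10)) &&& 0xFFFFFFFF
     h2 ^^^ (h2 >>> 6)) = pvMixB h b := by
  have key : ∀ x : Nat,
      (x % 4294967296 + (x % 4294967296) <<< 10) % 4294967296 = x * 1025 % 4294967296 := by
    intro x
    rw [Nat.shiftLeft_eq,
        show x % 4294967296 + (x % 4294967296) * 2 ^ 10 = (x % 4294967296) * 1025 by ring,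
        Nat.mul_mod, Nat.mod_mod_of_dvd x dvd_rfl, ← Nat.mul_mod]
  simp only [pvMixB, pv_and_mask32]
  rw [key]

-- peeling the little-endian register byte by byte is the left fold of pvMixB
theorem pv_peel_eq (chunk : List Nat) (h : Nat) (hb : ∀ b ∈ chunk, b < 256) :
    pvPeel h (pvFromLE chunk) chunk.length = chunk.foldl pvMixB h := by
  induction chunk generalizing h with
  | nil => simp [pvPeel, pvFromLE]
  | cons b rest ih =>
    have hb0 : b < 256 := hb b (by simp)
    have hfle : pvFromLE (b :: rest) = pvFromLE rest * 256 + b := by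
      simp [pvFromLE]
    have hand : pvFromLE (b :: rest) &&& 255 = b := by
      rw [pv_and_mask8, hfle, Nat.mul_comm, Nat.mul_add_mod, Nat.mod_eq_of_lt hb0]
    have hshift : pvFromLE (b :: rest) >>> 8 = pvFromLE rest := by
      rw [Nat.shiftRight_eq_div_pow, hfle]
      show (pvFromLE rest * 256 + b) / 256 = pvFromLE rest
      rw [Nat.mul_comm, Nat.mul_add_div (by norm_num), Nat.div_eq_of_lt hb0,
          Nat.add_zero]
    simp only [List.length_cons, pvPeel, hand, hshift, List.foldl_cons]
    exact ih _ (fun x hx => hb x (by simp [hx]))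

-- the chunked while loop is the left fold of pvMixB over the remaining bytes
theorem pv_chunks_eq (data : List Nat) (hb : ∀ b ∈ data, b < 256) :
    ∀ i h, pvChunks data h i = (data.drop i).foldl pvMixB h := by
  intro i
  induction hn : data.length - i using Nat.strong_induction_on generalizing i with
  | _ n ih =>
    intro h
    rw [pvChunks]
    split
    · next hlt =>
      have hchunk : ∀ b ∈ (data.drop i).take 64, b < 256 := fun b hbm =>
        hb b (List.mem_of_mem_drop (List.mem_of_mem_take hbm))
      show pvChunks data
          (pvPeel h (pvFromLE ((data.drop i).take 64)) ((data.drop i).take 64).length)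
          (i + 64) = _
      rw [pv_peel_eq _ _ hchunk]
      have hrec := ih (data.length - (i + 64)) (by omega) (i + 64) rfl
      rw [hrec _]
      have hsplit : data.drop i = (data.drop i).take 64 ++ data.drop (i + 64) := by
        rw [← List.drop_drop]
        exact (List.take_append_drop 64 (data.drop i)).symm
      conv_rhs => rw [hsplit]
      rw [List.foldl_append]
    · next hge =>
      rw [List.drop_eq_nil_of_le (by omega), List.foldl_nil]

-- A's finalisation equals B's (A's extra mask after the xor is a no-op since
-- the xor of two values < 2^32 is < 2^32)
theorem pv_final_eq (h : Nat) :
    (let h3 := (h + (h <<< 3)) &&& 0xFFFFFFFF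
     let h4 := (h3 ^^^ (h3 >>> 11)) &&& 0xFFFFFFFF
     let h5 := (h4 + (h4 <<< 15)) &&& 0xFFFFFFFF
     h5 &&& 0x3FFFFFFF) =
    (let h1 := h * 9 % 4294967296
     let h2 := h1 ^^^ (h1 >>> 11)
     h2 * 32769 % 4294967296 % 1073741824) := by
  simp only [pv_and_mask32, pv_and_mask30, Nat.shiftLeft_eq]
  norm_num
  have e1 : (h + h * 8) % 4294967296 = h * 9 % 4294967296 := by ring_nf
  rw [e1]
  have h1lt : h * 9 % 4294967296 < 4294967296 := Nat.mod_lt _ (by norm_num)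
  have hx : (h * 9 % 4294967296) ^^^ ((h * 9 % 4294967296) >>> 11) < 4294967296 :=
    Nat.xor_lt_two_pow (n := 32) h1lt
      (Nat.lt_of_le_of_lt (Nat.shiftRight_le _ _) h1lt)
  rw [Nat.mod_eq_of_lt hx]
  generalize h * 9 % 4294967296 ^^^ (h * 9 % 4294967296) >>> 11 = y
  rw [show y + y * 32768 = y * 32769 by ring]

-- on the domain every encoded byte is < 256
theorem pv_dom_bytes (inp : String) (hd : pvDomStr inp = true) :
    ∀ b ∈ inp.toList.map Char.toNat, b < 256 := by
  intro b hbm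
  rcases List.mem_map.mp hbm with ⟨c, hc, rfl⟩
  have := List.all_eq_true.mp hd c hc
  simp only [pvDomChar, Bool.or_eq_true, Bool.and_eq_true, decide_eq_true_eq,
    beq_iff_eq] at this
  omega

-- ===== VERDICT (by name: the statement is the Claim_ definition above) =====
theorem joaat_hash3f_spec : Claim_equal_joaat_hash3f := by
  intro inp hd
  unfold Spec_joaat_hash3f joaat_hash3f joaat_hash3f_alt
  have hb := pv_dom_bytes inp hd
  have hfold : (inp.toList.map Char.toNat).foldl
      (fun hsh byte =>
        let h1 := (hsh + byte) &&& 0xFFFFFFFF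
        let h2 := (h1 + (h1 <<< 10)) &&& 0xFFFFFFFF
        h2 ^^^ (h2 >>> 6)) 0 = pvChunks (inp.toList.map Char.toNat) 0 0 := by
    rw [pv_chunks_eq _ hb 0 0, List.drop_zero]
    congr 1
    funext h b
    exact pv_stepA_eq h b
  simp only [hfold]
  norm_cast
  exact pv_final_eq _
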